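-- pv_equiv track=rewrite | github.com/toughdave/scripting | scripts/python/reconciliation/survivorship_merge_students.py | index_rows
-- ===== SOURCE A (Python) =====
-- from typing import Any
--
-- def normalize(value: Any) -> str:
--     if value is None:
--         return ""
--     return str(value).strip()
--
-- def index_rows(rows: list[dict[str, str]], key_column: str) -> tuple[dict[str, dict[str, str]], int, int]:
--     indexed: dict[str, dict[str, str]] = {}
--     duplicate_count = 0
--     missing_key_rows = 0
--
--     for row in rows:
--         record_key = normalize(row.get(key_column))
--         if not record_key:
--             missing_key_rows += 1
--             continue
--         if record_key in indexed:
--             duplicate_count += 1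
--             continue
--         indexed[record_key] = row
--
--     return indexed, duplicate_count, missing_key_rows
-- ===== SOURCE B (Python) =====
-- from typing import Any
--
-- def normalize(value: Any) -> str:
--     if value is None:
--         return ""
--     return str(value).strip()
--
-- def index_rows(rows: list[dict[str, str]], key_column: str) -> tuple[dict[str, dict[str, str]], int, int]:
--     # Stage 1: group every row under its normalized key (missing keys group under "").
--     groups: dict[str, list[dict[str, str]]] = {}
--     for row in rows:
--         key = normalize(row.get(key_column))
--         groups[key] = groups.get(key, []) + [row]
--     # Stage 2: aggregate the groups.
--     indexed = {k: g[0] for k, g in groups.items() if k}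
--     duplicate_count = sum(len(g) - 1 for k, g in groups.items() if k)
--     missing_key_rows = len(groups.get("", []))
--     return indexed, duplicate_count, missing_key_rows
-- ===== Notes on version B (the rewrite author's own statement) =====
-- stated objective: alternative
-- what changed: B is a staged group-then-aggregate: it first builds a dict mapping each normalized key (including the empty key) to the full list of its rows, then derives the index as the head of each non-empty-key group, duplicate_count as the sum of (group size - 1), and missing_key_rows as the size of the empty-key group; A maintains a first-wins dict plus two counters in a single pass.
import Mathlib
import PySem

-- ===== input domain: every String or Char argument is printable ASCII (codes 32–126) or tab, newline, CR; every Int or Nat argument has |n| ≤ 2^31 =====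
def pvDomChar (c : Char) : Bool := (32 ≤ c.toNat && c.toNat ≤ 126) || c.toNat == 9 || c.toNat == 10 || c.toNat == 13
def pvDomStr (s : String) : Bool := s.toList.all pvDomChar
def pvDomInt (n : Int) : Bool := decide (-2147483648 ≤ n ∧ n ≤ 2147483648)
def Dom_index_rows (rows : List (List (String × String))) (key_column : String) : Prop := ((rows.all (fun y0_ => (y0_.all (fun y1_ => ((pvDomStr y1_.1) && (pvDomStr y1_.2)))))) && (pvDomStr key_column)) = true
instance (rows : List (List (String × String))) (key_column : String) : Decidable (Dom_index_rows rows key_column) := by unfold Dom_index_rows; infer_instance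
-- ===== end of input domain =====

-- ===== PORT A =====
-- B regroups the rows by key in a first stage and aggregates the groups in a second;
-- same cost, different decomposition (objective: alternative).

-- shared helper: both Pythons define the identical 'normalize' (None -> "", else str(v).strip())
def pvNormalize (v : Option String) : String :=
  match v with
  | none => ""
  | some s => PySem.Str.strip s

def index_rows (rows : List (List (String × String))) (key_column : String) : (List (String × List (String × String))) × Int × Int :=
  let st := rows.foldl (fun (st : PySem.Dict String (List (String × String)) × Int × Int) row =>
    let record_key := pvNormalize ((PySem.Dict.mk row).get? key_column)
    if record_key == "" then (st.1, st.2.1, st.2.2 + 1)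
    else if st.1.contains record_key then (st.1, st.2.1 + 1, st.2.2)
    else (st.1.insert record_key row, st.2.1, st.2.2)) (PySem.Dict.empty, 0, 0)
  (st.1.items, st.2.1, st.2.2)

-- ===== PORT B =====
def index_rows_alt (rows : List (List (String × String))) (key_column : String) : (List (String × List (String × String))) × Int × Int :=
  let groups := rows.foldl (fun (g : PySem.Dict String (List (List (String × String)))) row =>
    let key := pvNormalize ((PySem.Dict.mk row).get? key_column)
    g.insert key (g.getD key [] ++ [row])) PySem.Dict.empty
  -- the dict comprehension {k: g[0] for k, g in groups.items() if k}; every group is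
  -- nonempty by construction, so 'headD []' is exact for g[0] here
  let indexed := groups.items.foldl (fun (d : PySem.Dict String (List (String × String))) p =>
    if p.1 == "" then d else d.insert p.1 (p.2.headD [])) PySem.Dict.empty
  let duplicate_count : Int :=
    ((groups.items.filter (fun p => !(p.1 == ""))).map (fun p => (p.2.length : Int) - 1)).sum
  let missing_key_rows : Int := ((groups.getD "" []).length : Int)
  (indexed.items, duplicate_count, missing_key_rows)

-- ===== PRECONDITION & SPEC =====
def Spec_index_rows (rows : List (List (String × String))) (key_column : String) (out : (List (String × List (String × String))) × Int × Int) : Prop := out = index_rows_alt rows key_column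
instance (rows : List (List (String × String))) (key_column : String) (out : (List (String × List (String × String))) × Int × Int) : Decidable (Spec_index_rows rows key_column out) := by unfold Spec_index_rows; infer_instance

-- ===== CLAIM (what is proved, stated in full; the proofs are below) =====
def Claim_equal_index_rows : Prop := ∀ (rows : List (List (String × String))) (key_column : String), Dom_index_rows rows key_column → Spec_index_rows rows key_column (index_rows rows key_column)

-- ===== LEMMAS AND PROOFS =====

-- proof-side abbreviations
def pvKey (key_column : String) (row : List (String × String)) : String :=
  pvNormalize ((PySem.Dict.mk row).get? key_column)

-- B's groups fold, from a general start dict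
def pvG (key_column : String) (rows : List (List (String × String)))
    (g : PySem.Dict String (List (List (String × String)))) : PySem.Dict String (List (List (String × String))) :=
  rows.foldl (fun g row =>
    let key := pvKey key_column row
    g.insert key (g.getD key [] ++ [row])) g

-- the three aggregates B reads off a groups dict
def pvIdx (g : PySem.Dict String (List (List (String × String)))) : List (String × List (String × String)) :=
  (g.items.filter (fun p => !(p.1 == ""))).map (fun p => (p.1, p.2.headD []))

def pvS (g : PySem.Dict String (List (List (String × String)))) : Int :=
  ((g.items.filter (fun p => !(p.1 == ""))).map (fun p => (p.2.length : Int) - 1)).sum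

def pvM (g : PySem.Dict String (List (List (String × String)))) : Int :=
  ((g.getD "" []).length : Int)

-- keys of a groups dict stay Nodup
theorem pvG_nodup (key_column : String) (rows : List (List (String × String)))
    (g : PySem.Dict String (List (List (String × String)))) (h : g.keys.Nodup) :
    (pvG key_column rows g).keys.Nodup :=
  PySem.Dict.nodup_keys_foldl_insert_key rows (pvKey key_column)
    (fun g row => g.getD (pvKey key_column row) [] ++ [row]) g h

-- updating-in-place a key keeps the nonempty-key filtered list's shape
theorem pvFilter_map_upd {v : List (List (String × String))} (l : List (String × List (List (String × String)))) (k : String) :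
    (l.map (fun p => if p.1 == k then (k, v) else p)).filter (fun p => !(p.1 == "")) =
    (l.filter (fun p => !(p.1 == ""))).map (fun p => if p.1 == k then (k, v) else p) := by
  rw [List.filter_map]
  refine congrArg _ (List.filter_congr ?_)
  intro p _
  by_cases hk : (p.1 == k) = true
  · have hp1 : p.1 = k := by simpa using hk
    simp [Function.comp, hp1]
  · simp [Function.comp, hk]

-- updating the existing group of a nonempty key: index unchanged, sum + 1
theorem pvUpd (l : List (String × List (List (String × String)))) (k : String)
    (w : List (List (String × String))) (r : List (String × String))
    (hnd : (l.map Prod.fst).Nodup) (hmem : (k, w) ∈ l) (hw : w ≠ []) :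
    (l.map (fun p => if p.1 == k then (k, w ++ [r]) else p)).map (fun p => (p.1, p.2.headD [])) =
      l.map (fun p => (p.1, p.2.headD [])) ∧
    ((l.map (fun p => if p.1 == k then (k, w ++ [r]) else p)).map (fun p => (p.2.length : Int) - 1)).sum =
      (l.map (fun p => (p.2.length : Int) - 1)).sum + 1 := by
  induction l with
  | nil => simp at hmem
  | cons p t ih =>
    simp only [List.map_cons, List.nodup_cons, List.mem_map] at hnd
    by_cases hk : (p.1 == k) = true
    · have hpk : p.1 = k := by simpa using hk
      have hpe : p = (k, w) := by
        rcases List.mem_cons.1 hmem with h | h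
        · exact h.symm
        · exact absurd ⟨(k, w), h, hpk.symm⟩ hnd.1
      subst hpe
      have hid : ∀ q ∈ t, (fun p => if (p.1 == k) = true then (k, w ++ [r]) else p) q = q := by
        intro q hq
        have hq1 : ¬ (q.1 == k) = true := by
          intro hqk
          exact hnd.1 ⟨q, hq, by simpa using hqk⟩
        simp [hq1]
      have hmap : t.map (fun p => if (p.1 == k) = true then (k, w ++ [r]) else p) = t := by
        rw [List.map_congr_left hid]; exact List.map_id t
      have hhead : (w ++ [r]).headD ([] : List (String × String)) = w.headD [] := by
        cases w with
        | nil => exact absurd rfl hw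
        | cons a b => rfl
      constructor
      · rw [List.map_cons, if_pos hk, hmap, List.map_cons, List.map_cons, hhead]
      · rw [List.map_cons, if_pos hk, hmap, List.map_cons, List.map_cons,
          List.sum_cons, List.sum_cons, List.length_append]
        simp only [List.length_singleton]; push_cast; ring
    · have hmem' : (k, w) ∈ t := by
        rcases List.mem_cons.1 hmem with h | h
        · exact absurd (by simp [← h]) hk
        · exact h
      obtain ⟨ih1, ih2⟩ := ih hnd.2 hmem'
      constructor
      · rw [List.map_cons, if_neg hk, List.map_cons, List.map_cons, ih1]
      · rw [List.map_cons, if_neg hk, List.map_cons, List.map_cons,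
          List.sum_cons, List.sum_cons, ih2]
        ring

-- a dict whose items read as pvIdx g has the same nonempty keys as g
theorem pvContains (a : PySem.Dict String (List (String × String)))
    (g : PySem.Dict String (List (List (String × String))))
    (hR : a.items = pvIdx g) (k : String) (hk : k ≠ "") : a.contains k = g.contains k := by
  rw [PySem.Dict.contains_eq_decide_mem_keys, PySem.Dict.contains_eq_decide_mem_keys]
  simp only [PySem.Dict.keys, hR, pvIdx, List.map_map]
  congr 1
  simp only [eq_iff_iff, List.mem_map, Function.comp, List.mem_filter]
  constructor
  · rintro ⟨p, ⟨hp, -⟩, hpk⟩; exact ⟨p, hp, hpk⟩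
  · rintro ⟨p, hp, hpk⟩
    exact ⟨p, ⟨hp, by simp [hpk, hk]⟩, hpk⟩

-- inserting a grown group keeps every group nonempty
theorem pvNe_insert (g : PySem.Dict String (List (List (String × String))))
    (k : String) (w : List (List (String × String))) (r : List (String × String))
    (hne : ∀ p ∈ g.items, p.2 ≠ []) :
    ∀ p ∈ (g.insert k (w ++ [r])).items, p.2 ≠ [] := by
  intro p hp
  rcases (PySem.Dict.mem_items_insert _ _ _ _).1 hp with h1 | h2
  · subst h1; simp
  · exact hne p h2.1

-- one step of the groups fold, empty key: index and sum unchanged, missing + 1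
theorem pvIns_empty (g : PySem.Dict String (List (List (String × String))))
    (r : List (String × String)) (k : String) (hke : k = "") :
    pvIdx (g.insert k (g.getD k [] ++ [r])) = pvIdx g ∧
    pvS (g.insert k (g.getD k [] ++ [r])) = pvS g ∧
    pvM (g.insert k (g.getD k [] ++ [r])) = pvM g + 1 := by
  subst hke
  have hM : pvM (g.insert "" (g.getD "" [] ++ [r])) = pvM g + 1 := by
    simp [pvM, PySem.Dict.getD_insert_self]
  have hfil : ((g.insert "" (g.getD "" [] ++ [r])).items.filter (fun p => !(p.1 == ""))) =
      (g.items.filter (fun p => !(p.1 == ""))) := by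
    rw [PySem.Dict.items_insert]
    by_cases hc : g.contains "" = true
    · rw [if_pos hc, pvFilter_map_upd]
      refine (List.map_congr_left (fun p hp => ?_)).trans (List.map_id _)
      have : ¬ (p.1 == "") = true := by simpa using (List.mem_filter.1 hp).2
      simp [this]
    · rw [if_neg hc, List.filter_append]
      simp
  exact ⟨by simp [pvIdx, hfil], by simp [pvS, hfil], hM⟩

-- one step, nonempty duplicate key: index unchanged, sum + 1, missing unchanged
theorem pvIns_dup (g : PySem.Dict String (List (List (String × String))))
    (r : List (String × String)) (k : String) (hk : k ≠ "")
    (hc : g.contains k = true) (hnd : g.keys.Nodup) (hne : ∀ p ∈ g.items, p.2 ≠ []) :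
    pvIdx (g.insert k (g.getD k [] ++ [r])) = pvIdx g ∧
    pvS (g.insert k (g.getD k [] ++ [r])) = pvS g + 1 ∧
    pvM (g.insert k (g.getD k [] ++ [r])) = pvM g := by
  have hM : pvM (g.insert k (g.getD k [] ++ [r])) = pvM g := by
    simp only [pvM, PySem.Dict.getD_insert_of_ne _ _ _ (Ne.symm hk)]
  obtain ⟨w, hw⟩ : ∃ w, g.get? k = some w := by
    rcases h : g.get? k with _ | w
    · rw [(PySem.Dict.get?_eq_none_iff_contains _ _).1 h] at hc; cases hc
    · exact ⟨w, rfl⟩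
  have hgd : g.getD k [] = w := PySem.Dict.getD_of_get?_eq_some _ _ hw
  have hmemi : (k, w) ∈ g.items := PySem.Dict.mem_items_of_get?_eq_some _ hw
  have hwne : w ≠ [] := hne _ hmemi
  have hmemf : (k, w) ∈ g.items.filter (fun p => !(p.1 == "")) :=
    List.mem_filter.2 ⟨hmemi, by simp [hk]⟩
  have hndf : ((g.items.filter (fun p => !(p.1 == ""))).map Prod.fst).Nodup := by
    have hsub : ((g.items.filter (fun p => !(p.1 == ""))).map Prod.fst).Sublist (g.items.map Prod.fst) :=
      List.Sublist.map Prod.fst List.filter_sublist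
    exact (by simpa [PySem.Dict.keys] using hnd : (g.items.map Prod.fst).Nodup).sublist hsub
  obtain ⟨hU1, hU2⟩ := pvUpd (g.items.filter (fun p => !(p.1 == ""))) k w r hndf hmemf hwne
  have hfil : ((g.insert k (g.getD k [] ++ [r])).items.filter (fun p => !(p.1 == ""))) =
      (g.items.filter (fun p => !(p.1 == ""))).map (fun p => if p.1 == k then (k, w ++ [r]) else p) := by
    rw [PySem.Dict.items_insert, if_pos hc, hgd, pvFilter_map_upd]
  exact ⟨by rw [pvIdx, hfil, hU1]; rfl, by rw [pvS, hfil, hU2]; rfl, hM⟩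

-- one step, fresh nonempty key: index appends, sum and missing unchanged
theorem pvIns_fresh (g : PySem.Dict String (List (List (String × String))))
    (r : List (String × String)) (k : String) (hk : k ≠ "")
    (hc : g.contains k = false) :
    pvIdx (g.insert k (g.getD k [] ++ [r])) = pvIdx g ++ [(k, r)] ∧
    pvS (g.insert k (g.getD k [] ++ [r])) = pvS g ∧
    pvM (g.insert k (g.getD k [] ++ [r])) = pvM g := by
  have hgd : g.getD k [] = [] := PySem.Dict.getD_of_not_contains g [] hc
  have hit : (g.insert k (g.getD k [] ++ [r])).items = g.items ++ [(k, [r])] := by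
    rw [PySem.Dict.items_insert, if_neg (by simp [hc]), hgd]; rfl
  refine ⟨?_, ?_, ?_⟩
  · rw [pvIdx, hit, List.filter_append]
    simp [pvIdx, hk]
  · rw [pvS, hit, List.filter_append]
    simp [pvS, hk]
  · simp only [pvM, PySem.Dict.getD_insert_of_ne _ _ _ (Ne.symm hk)]

theorem pvG_cons (key_column : String) (r : List (String × String))
    (rs : List (List (String × String))) (g : PySem.Dict String (List (List (String × String)))) :
    pvG key_column (r :: rs) g =
      pvG key_column rs (g.insert (pvKey key_column r) (g.getD (pvKey key_column r) [] ++ [r])) := rfl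

-- the key fact about A's loop: from any state whose dict reads as pvIdx of some groups
-- dict, the loop lands in the state read off the extended groups dict
theorem pvLoopA (key_column : String) (rows : List (List (String × String)))
    (a : PySem.Dict String (List (String × String)))
    (g : PySem.Dict String (List (List (String × String)))) (dup miss : Int)
    (hR : a.items = pvIdx g) (hne : ∀ p ∈ g.items, p.2 ≠ []) (hnd : g.keys.Nodup) :
    (rows.foldl (fun (st : PySem.Dict String (List (String × String)) × Int × Int) row =>
      let record_key := pvNormalize ((PySem.Dict.mk row).get? key_column)
      if record_key == "" then (st.1, st.2.1, st.2.2 + 1)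
      else if st.1.contains record_key then (st.1, st.2.1 + 1, st.2.2)
      else (st.1.insert record_key row, st.2.1, st.2.2)) (a, dup, miss)) =
    ((rows.foldl (fun (st : PySem.Dict String (List (String × String)) × Int × Int) row =>
      let record_key := pvNormalize ((PySem.Dict.mk row).get? key_column)
      if record_key == "" then (st.1, st.2.1, st.2.2 + 1)
      else if st.1.contains record_key then (st.1, st.2.1 + 1, st.2.2)
      else (st.1.insert record_key row, st.2.1, st.2.2)) (a, dup, miss)).1,
     dup + pvS (pvG key_column rows g) - pvS g,
     miss + pvM (pvG key_column rows g) - pvM g) ∧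
    (rows.foldl (fun (st : PySem.Dict String (List (String × String)) × Int × Int) row =>
      let record_key := pvNormalize ((PySem.Dict.mk row).get? key_column)
      if record_key == "" then (st.1, st.2.1, st.2.2 + 1)
      else if st.1.contains record_key then (st.1, st.2.1 + 1, st.2.2)
      else (st.1.insert record_key row, st.2.1, st.2.2)) (a, dup, miss)).1.items =
        pvIdx (pvG key_column rows g) := by
  induction rows generalizing a g dup miss with
  | nil =>
    refine ⟨by simp [pvG], by simpa [pvG] using hR⟩
  | cons r rs ih =>
    rw [List.foldl_cons, pvG_cons]
    set k := pvNormalize ((PySem.Dict.mk r).get? key_column) with hkdef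
    have hkk : pvKey key_column r = k := rfl
    rw [hkk]
    by_cases hk : (k == "") = true
    · have hke : k = "" := by simpa using hk
      obtain ⟨h1, h2, h3⟩ := pvIns_empty g r k hke
      simp only [hk, reduceIte]
      obtain ⟨ihA, ihB⟩ := ih a (g.insert k (g.getD k [] ++ [r])) dup (miss + 1)
        (by rw [hR, h1]) (pvNe_insert g k (g.getD k []) r hne) (PySem.Dict.nodup_keys_insert _ _ _ hnd)
      rw [ihA]
      refine ⟨by simp only [Prod.mk.injEq]; refine ⟨trivial, ?_, ?_⟩ <;> omega, ihB⟩
    · simp only [hk, Bool.false_eq_true, if_false]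
      by_cases hc : a.contains k = true
      · have hkne : k ≠ "" := by simpa using hk
        have hgc : g.contains k = true := by rw [← pvContains a g hR k hkne]; exact hc
        obtain ⟨h1, h2, h3⟩ := pvIns_dup g r k hkne hgc hnd hne
        simp only [hc, reduceIte]
        obtain ⟨ihA, ihB⟩ := ih a (g.insert k (g.getD k [] ++ [r])) (dup + 1) miss
          (by rw [hR, h1]) (pvNe_insert g k (g.getD k []) r hne) (PySem.Dict.nodup_keys_insert _ _ _ hnd)
        rw [ihA]
        refine ⟨by simp only [Prod.mk.injEq]; refine ⟨trivial, ?_, ?_⟩ <;> omega, ihB⟩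
      · have hkne : k ≠ "" := by simpa using hk
        have hgc : g.contains k = false := by
          rw [← pvContains a g hR k hkne]; simpa using hc
        obtain ⟨h1, h2, h3⟩ := pvIns_fresh g r k hkne hgc
        simp only [hc, Bool.false_eq_true, if_false]
        have hR1 : (a.insert k r).items = pvIdx (g.insert k (g.getD k [] ++ [r])) := by
          rw [h1, PySem.Dict.items_insert, if_neg (by simp [hc]), hR]
        obtain ⟨ihA, ihB⟩ := ih (a.insert k r) (g.insert k (g.getD k [] ++ [r])) dup miss
          hR1 (pvNe_insert g k (g.getD k []) r hne) (PySem.Dict.nodup_keys_insert _ _ _ hnd)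
        rw [ihA]
        refine ⟨by simp only [Prod.mk.injEq]; refine ⟨trivial, ?_, ?_⟩ <;> omega, ihB⟩

-- B's conditional insert fold over a Nodup-keyed items list produces exactly pvIdx
theorem pvIdx_fold (l : List (String × List (List (String × String)))) (h : (l.map Prod.fst).Nodup) :
    (l.foldl (fun (d : PySem.Dict String (List (String × String))) p =>
      if p.1 == "" then d else d.insert p.1 (p.2.headD [])) PySem.Dict.empty).items =
    (l.filter (fun p => !(p.1 == ""))).map (fun p => (p.1, p.2.headD [])) := by
  have hfun : (fun (d : PySem.Dict String (List (String × String))) (p : String × List (List (String × String))) =>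
      if p.1 == "" then d else d.insert p.1 (p.2.headD [])) =
      (fun d p => if (!(p.1 == "")) = true then d.insert p.1 (p.2.headD []) else d) := by
    funext d p
    by_cases hp : (p.1 == "") = true <;> simp [hp]
  rw [hfun, ← List.foldl_filter]
  have hndf : ((l.filter (fun p => !(p.1 == ""))).map Prod.fst).Nodup :=
    h.sublist (List.Sublist.map Prod.fst List.filter_sublist)
  rw [PySem.Dict.items_foldl_insert_fresh _ Prod.fst (fun p => p.2.headD []) PySem.Dict.empty
    (fun p _ => PySem.Dict.contains_empty _) hndf]
  simp [PySem.Dict.empty]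

-- ===== VERDICT (by name: the statement is the Claim_ definition above) =====
theorem index_rows_spec : Claim_equal_index_rows := by
  intro rows key_column _
  show index_rows rows key_column = index_rows_alt rows key_column
  have hndG : ((pvG key_column rows PySem.Dict.empty).items.map Prod.fst).Nodup := by
    have h := pvG_nodup key_column rows PySem.Dict.empty (by simp [PySem.Dict.keys, PySem.Dict.empty])
    simpa [PySem.Dict.keys] using h
  obtain ⟨hA, hAitems⟩ := pvLoopA key_column rows PySem.Dict.empty PySem.Dict.empty 0 0 rfl
    (by intro p hp; simp [PySem.Dict.empty] at hp)
    (by simp [PySem.Dict.keys, PySem.Dict.empty])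
  have hBitems := pvIdx_fold (pvG key_column rows PySem.Dict.empty).items hndG
  apply Prod.ext
  · exact hAitems.trans hBitems.symm
  · apply Prod.ext
    · have h := congrArg (fun t =>
        (t : PySem.Dict String (List (String × String)) × Int × Int).2.1) hA
      simp only at h
      calc (index_rows rows key_column).2.1
          = 0 + pvS (pvG key_column rows PySem.Dict.empty) - pvS PySem.Dict.empty := h
        _ = pvS (pvG key_column rows PySem.Dict.empty) := by
            have h0 : pvS (PySem.Dict.empty : PySem.Dict String (List (List (String × String)))) = 0 := rfl
            omega
        _ = (index_rows_alt rows key_column).2.1 := rfl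
    · have h := congrArg (fun t =>
        (t : PySem.Dict String (List (String × String)) × Int × Int).2.2) hA
      simp only at h
      calc (index_rows rows key_column).2.2
          = 0 + pvM (pvG key_column rows PySem.Dict.empty) - pvM PySem.Dict.empty := h
        _ = pvM (pvG key_column rows PySem.Dict.empty) := by
            have h0 : pvM (PySem.Dict.empty : PySem.Dict String (List (List (String × String)))) = 0 := rfl
            omega
        _ = (index_rows_alt rows key_column).2.2 := rfl
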